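/- GENERATED by tools/from_farm_form.py from prooffarm-gif/accepted/DGifGetCodeNext.2/Lemmas.lean (a worked proof of the farm's unit `DGifGetCodeNext.2`,
   accepted by the verdict) — do not edit. -/
import Gif.Spec.Units.DGifGetCodeNext_2
import Gif.Spec.AllSegs

/-!
  Lemmas for the unit `DGifGetCodeNext.2` (a BODY segment of a protected function: the terminator arm with three checked stores;
  the data arm with two checked stores, `InternalRead(gif, pv.Buf + 1, n)` and the comparison of its result). The segment is walked
  in TWO STEPS that meet at the return address of the call, 0x10a05c (`ret9`), with a private assertion there.

      cn2_Quiet        the windows a store of this segment goes to (own stack, `*CodeBlock`, `pv.PixelCount`, `pv.Buf`, `gif.Error`)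
      cn2_Allowed      `cn2_Quiet`, or the cursor's `cur` field (what InternalRead moves)
      cn2_body_carry   `Body` at a later state from a footprint of `cn2_Allowed` windows and the three invariants there
      cn2_body_quiet   `Body` at a later state from a footprint of `cn2_Quiet` windows (the three invariants are kept)
      cn2_AtRet9       the assertion at `ret9`
      cn2_seg_head     0x109fe3 … 0x109fc6 (the terminator arm) or … 0x10a05c (the data arm): `AfterLen` → `Done` ∨ `cn2_AtRet9`
      cn2_seg_tail     0x10a05c … 0x109fc6 (both arms): `cn2_AtRet9` → `Done`
-/

open X86 X86.User Asan ProgX.Base ProgX.Base.Spec Gif.Spec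

set_option maxRecDepth 4000
set_option maxHeartbeats 4000000

namespace Gif.Spec.DGifGetCodeNext_2

/-- **A window that a store of this segment may go to**: the function's own stack below the saved registers, `*CodeBlock`,
`pv.PixelCount`, `pv.Buf`, `gif.Error`. Each is loose, a heap window, off the cursor, off the saved registers and the return
address, and inside a window of the function's footprint. -/
def cn2_Quiet (F : Forest) (e : State) (w : Span) : Prop :=
  ((e.reg .rsp).toNat - 320 ≤ w.lo ∧ w.hi ≤ (e.reg .rsp).toNat - 48) ∨
  ((e.reg .rsi).toNat ≤ w.lo ∧ w.hi ≤ (e.reg .rsi).toNat + 8) ∨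
  (F.pv + 56 ≤ w.lo ∧ w.hi ≤ F.pv + 64) ∨
  (F.pv + 88 ≤ w.lo ∧ w.hi ≤ F.pv + 344) ∨
  (F.gif + 96 ≤ w.lo ∧ w.hi ≤ F.gif + 100)

/-- **A window of the footprint of a step of this segment**: `cn2_Quiet`, or the cursor's `cur` field (InternalRead). -/
def cn2_Allowed (F : Forest) (R : Rd) (e : State) (w : Span) : Prop :=
  cn2_Quiet F e w ∨ (R.cur ≤ w.lo ∧ w.hi ≤ R.cur + 8)

/-- **`Body` AT A LATER STATE `s`** of the same activation: the registers of the body are those of `v`, the memory differs from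
`v`'s in `cn2_Allowed` windows only, and the three invariants hold at `s` (after a call: from the callee's `Back`; after stores:
`cn2_body_quiet`). The saved registers, the return address and the footprint are carried here, once. -/
theorem cn2_body_carry {cut cut' : Word} {H : Heap} {rest : List Obj} {frames : List (Nat × FrameLayout)} {F : Forest} {R : Rd}
    {u₀ e : State} {ret : Word} {v s : State} (hb : DGifGetCodeNext.Body cut H rest frames F R u₀ e ret v)
    (hrip : s.rip = cut') (hrsp : s.reg .rsp = e.reg .rsp - 136) (hrbx : s.reg .rbx = v.reg .rbx)
    (hr13 : s.reg .r13 = v.reg .r13) (hrbp : s.reg .rbp = v.reg .rbp)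
    (hcode : (conv u₀).code.In s.mem) (habi : (conv u₀).inv s)
    {ws : List Span} (hs : Mem.SameExcept ws v.mem s.mem) (hw : ∀ w, w ∈ ws → cn2_Allowed F R e w)
    (hinv : HeapInv H rest (DGifGetCodeNext.framesIn frames e) ((e.reg .rsp).toNat - 136) s.mem)
    (hok : GifOK H F R s.mem) (hrem : rem R s.mem ≤ rem R v.mem) :
    DGifGetCodeNext.Body cut' H rest frames F R u₀ e ret s := by
  have he_room : 7340032 + 320 ≤ (e.reg .rsp).toNat := hb.entry.room
  have he_top : (e.reg .rsp).toNat + 8 ≤ 8388608 := hb.entry.top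
  obtain ⟨henv, hrdi, hout⟩ := hb.pre
  have habove := hb.block_above
  have hcur := henv.ctx.cursor_range henv.heap.inv.shadow
  have hgin := henv.ok.owns.inside henv.heap.inv.heap (o := (F.gif, 120)) List.mem_cons_self
  have hpin := henv.ok.owns.inside henv.heap.inv.heap (o := (F.pv, 24936)) (List.mem_cons_of_mem _ List.mem_cons_self)
  have hbase := henv.heap.base
  simp only at hgin hpin
  rw [hbase] at hgin hpin
  have hg1 := hgin.1
  have hp1 := hpin.1
  clear hgin hpin
  -- every window written misses the saved registers and the return address `[RA − 48, RA + 8)`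
  have hslots : ∀ w, w ∈ ws → w.hi ≤ (e.reg .rsp).toNat - 48 ∨ (e.reg .rsp).toNat + 8 ≤ w.lo := by
    intro w hin
    rcases hw w hin with (h | h | h | h | h) | h
    · left
      exact h.2
    · right
      omega
    · right
      omega
    · right
      omega
    · right
      omega
    · right
      omega
  -- every window written lies inside a window of the function's footprint
  have hsub : ∀ w, w ∈ ws → ∀ a : Nat, w.lo ≤ a → a < w.hi → ∃ w', w' ∈
      [⟨(e.reg .rsp).toNat - 320, (e.reg .rsp).toNat⟩,
       shadowSpan ((e.reg .rsp).toNat - 120) ((e.reg .rsp).toNat - 56),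
       ⟨F.pv + 56, F.pv + 64⟩,
       ⟨F.pv + 88, F.pv + 344⟩,
       ⟨(e.reg .rsi).toNat, (e.reg .rsi).toNat + 8⟩,
       ⟨F.gif + 96, F.gif + 100⟩,
       (⟨R.cur, R.cur + 8⟩ : Span)] ∧ w'.lo ≤ a ∧ a < w'.hi := by
    intro w hin a h1 h2
    rcases hw w hin with (h | h | h | h | h) | h
    · refine ⟨⟨(e.reg .rsp).toNat - 320, (e.reg .rsp).toNat⟩, by simp only [List.mem_cons, true_or], ?_, ?_⟩
      · show (e.reg .rsp).toNat - 320 ≤ a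
        omega
      · show a < (e.reg .rsp).toNat
        omega
    · refine ⟨⟨(e.reg .rsi).toNat, (e.reg .rsi).toNat + 8⟩, by simp only [List.mem_cons, true_or, or_true], ?_, ?_⟩
      · show (e.reg .rsi).toNat ≤ a
        omega
      · show a < (e.reg .rsi).toNat + 8
        omega
    · refine ⟨⟨F.pv + 56, F.pv + 64⟩, by simp only [List.mem_cons, true_or, or_true], ?_, ?_⟩
      · show F.pv + 56 ≤ a
        omega
      · show a < F.pv + 64
        omega
    · refine ⟨⟨F.pv + 88, F.pv + 344⟩, by simp only [List.mem_cons, true_or, or_true], ?_, ?_⟩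
      · show F.pv + 88 ≤ a
        omega
      · show a < F.pv + 344
        omega
    · refine ⟨⟨F.gif + 96, F.gif + 100⟩, by simp only [List.mem_cons, true_or, or_true], ?_, ?_⟩
      · show F.gif + 96 ≤ a
        omega
      · show a < F.gif + 100
        omega
    · refine ⟨⟨R.cur, R.cur + 8⟩, by simp only [List.mem_cons, true_or, or_true], ?_, ?_⟩
      · show R.cur ≤ a
        omega
      · show a < R.cur + 8
        omega
  -- a saved register's slot `[RA − off, RA − off + 8)`, `off ≤ 48`
  have hslot : ∀ off : Nat, 8 ≤ off → off ≤ 48 →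
      ∀ w, w ∈ ws → (e.reg .rsp).toNat - off + 8 ≤ w.lo ∨ w.hi ≤ (e.reg .rsp).toNat - off := by
    intro off h8 h48 w hin
    have := hslots w hin
    omega
  exact {
    entry := hb.entry
    pre := hb.pre
    block_above := hb.block_above
    rip := hrip
    rsp := hrsp
    rbx := hrbx.trans hb.rbx
    r13 := hr13.trans hb.r13
    rbp := hrbp.trans hb.rbp
    slot_r15 := slot_sameExcept hs (e.reg .rsp) 8 8 _ (by omega) (by omega) hb.slot_r15 (hslot 8 (by omega) (by omega))
    slot_r14 := slot_sameExcept hs (e.reg .rsp) 16 8 _ (by omega) (by omega) hb.slot_r14 (hslot 16 (by omega) (by omega))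
    slot_r13 := slot_sameExcept hs (e.reg .rsp) 24 8 _ (by omega) (by omega) hb.slot_r13 (hslot 24 (by omega) (by omega))
    slot_r12 := slot_sameExcept hs (e.reg .rsp) 32 8 _ (by omega) (by omega) hb.slot_r12 (hslot 32 (by omega) (by omega))
    slot_rbp := slot_sameExcept hs (e.reg .rsp) 40 8 _ (by omega) (by omega) hb.slot_rbp (hslot 40 (by omega) (by omega))
    slot_rbx := slot_sameExcept hs (e.reg .rsp) 48 8 _ (by omega) (by omega) hb.slot_rbx (hslot 48 (by omega) (by omega))
    slot_ra := by
      rw [hs.readLE (e.reg .rsp) 8 (by omega) ?_]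
      · exact hb.slot_ra
      · intro w hin
        have := hslots w hin
        omega
    inv := hinv
    ok := hok
    rem := Nat.le_trans hrem hb.rem
    same := hb.same.step_same hs hsub
    code := hcode
    abi := habi
  }

/-- **The three invariants through stores into `cn2_Quiet` windows**: the heap's invariant (every window is a heap window, no
shadow byte written), the state invariant (every window is loose), the reader's measure (a loose window misses the cursor). -/
theorem cn2_keep {cut : Word} {H : Heap} {rest : List Obj} {frames : List (Nat × FrameLayout)} {F : Forest} {R : Rd}
    {u₀ e : State} {ret : Word} {v : State} {mem' : Mem} (hb : DGifGetCodeNext.Body cut H rest frames F R u₀ e ret v)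
    (hun : ShadowUntouched v.mem mem') {ws : List Span} (hs : Mem.SameExcept ws v.mem mem')
    (hw : ∀ w, w ∈ ws → cn2_Quiet F e w) :
    HeapInv H rest (DGifGetCodeNext.framesIn frames e) ((e.reg .rsp).toNat - 136) mem' ∧ GifOK H F R mem' ∧
      rem R mem' = rem R v.mem := by
  have he_room : 7340032 + 320 ≤ (e.reg .rsp).toNat := hb.entry.room
  have he_top : (e.reg .rsp).toNat + 8 ≤ 8388608 := hb.entry.top
  obtain ⟨henv, hrdi, hout⟩ := hb.pre
  have hcur := henv.ctx.cursor_range henv.heap.inv.shadow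
  have hbase := henv.heap.base
  have hok := hb.inv.heap
  -- every window is loose and a heap window
  have hlw : ∀ w, w ∈ ws → Loose H F R w ∧ HeapWin H w := by
    intro w hin
    rcases hw w hin with h | h | h | h | h
    · constructor
      · apply Loose.stack hok
        · omega
        · omega
        · omega
      · apply HeapWin.offHeap hok
        left
        omega
    · constructor
      · apply hout.buf.loose.sub
        · exact h.1
        · exact h.2
      · apply hout.buf.win.sub
        · exact h.1
        · exact h.2
    · constructor
      · apply Loose.pvBody
        left
        omega
      · apply HeapWin.pv hok hb.ok.owns
        · omega
        · omega
    · constructor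
      · apply Loose.pvBody
        right
        omega
      · apply HeapWin.pv hok hb.ok.owns
        · omega
        · omega
    · constructor
      · apply Loose.gifScalar
        right
        right
        omega
      · apply HeapWin.gif hok hb.ok.owns
        · omega
        · omega
  refine ⟨?_, ?_, ?_⟩
  · exact hb.inv.sameExcept hun hs (fun w hin => (hlw w hin).2)
  · exact hb.ok.sameExcept hok ⟨hcur.1, hcur.2.1⟩ hs (fun w hin => (hlw w hin).1)
  · exact rem_loose hs (fun w hin => (hlw w hin).1) hok (hb.ok.owns.placed hok) ⟨hcur.1, hcur.2.1⟩

/-- **`Body` AT A LATER STATE `s` behind stores into `cn2_Quiet` windows only** (no call in between): `Body` at `s`, and the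
reader is where it was. -/
theorem cn2_body_quiet {cut cut' : Word} {H : Heap} {rest : List Obj} {frames : List (Nat × FrameLayout)} {F : Forest} {R : Rd}
    {u₀ e : State} {ret : Word} {v s : State} (hb : DGifGetCodeNext.Body cut H rest frames F R u₀ e ret v)
    (hrip : s.rip = cut') (hrsp : s.reg .rsp = e.reg .rsp - 136) (hrbx : s.reg .rbx = v.reg .rbx)
    (hr13 : s.reg .r13 = v.reg .r13) (hrbp : s.reg .rbp = v.reg .rbp)
    (hcode : (conv u₀).code.In s.mem) (habi : (conv u₀).inv s)
    (hun : ShadowUntouched v.mem s.mem) {ws : List Span} (hs : Mem.SameExcept ws v.mem s.mem)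
    (hw : ∀ w, w ∈ ws → cn2_Quiet F e w) :
    DGifGetCodeNext.Body cut' H rest frames F R u₀ e ret s ∧ rem R s.mem = rem R v.mem := by
  obtain ⟨hinv, hok, hrem⟩ := cn2_keep hb hun hs hw
  refine ⟨?_, hrem⟩
  exact cn2_body_carry hb hrip hrsp hrbx hr13 hrbp hcode habi hs (fun w hin => Or.inl (hw w hin)) hinv hok (Nat.le_of_eq hrem)

/-- **At 10A05CH (ret9), `InternalRead(gif, pv.Buf + 1, n)` has returned**: `Body`; the result so far (`r12d = 1`) and
`*CodeBlock = &pv.Buf` stand; at least the length byte was consumed. (`eax` = the count and `Buf` = `n` are compared next: the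
comparison decides only between GIF_OK and the error arm, and neither needs their values.) -/
structure cn2_AtRet9 (H : Heap) (rest : List Obj) (frames : List (Nat × FrameLayout)) (F : Forest) (R : Rd) (u₀ e : State)
    (ret : Word) (v : State) : Prop where
  body : DGifGetCodeNext.Body Gif.L.DGifGetCodeNext.ret9 H rest frames F R u₀ e ret v
  r12 : (v.reg .r12).toNat = 1
  block : rd v.mem (e.reg .rsi).toNat 8 = F.pv + 88
  adv : rem R v.mem + 1 ≤ rem R e.mem

/-- **The length byte as the walker leaves it in the store `mov [r14 + 58H], r15b`** (and in the branch fact of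
`test r15b, r15b`): the low byte of `movzx r15d, byte [Buf]` is the byte read. -/
theorem cn2_byte_val (n : Nat) (h : n < 256) : (BitVec.setWidth 8 (BitVec.zeroExtend 32 (BitVec.ofNat 8 n))).toNat = n := by
  simp only [BitVec.toNat_setWidth, BitVec.truncate_eq_setWidth, BitVec.toNat_ofNat]
  omega

/-- **`movzx edx, r15b`** (dgif_lib.c:796, the third argument of InternalRead): the byte read, zero-extended. -/
theorem cn2_byte_reg (n : Nat) (h : n < 256) :
    (Word.ofBV (BitVec.zeroExtend 32 (BitVec.setWidth 8 (BitVec.zeroExtend 32 (BitVec.ofNat 8 n))))).toNat = n := by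
  rw [toNat_ofBV32]
  simp only [BitVec.toNat_setWidth, BitVec.truncate_eq_setWidth, BitVec.toNat_ofNat]
  omega

/-- **109FE3H … 109FC6H (the terminator arm) or … the call of InternalRead … 10A05CH (ret9)** (dgif_lib.c:791-796): `r12d = eax = 1`;
`Buf = 0`: the checked stores `*CodeBlock = NULL`, `pv.Buf[0] = 0`, `pv.PixelCount = 0`: `Done` with the result 1; `Buf = n > 0`:
the checked stores `*CodeBlock = &pv.Buf`, `pv.Buf[0] = n`, then `InternalRead(gif, pv.Buf + 1, n)`: `cn2_AtRet9`. The contract of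
InternalRead is taken for every byte count (the count `n` is the byte `Buf` of the entry state `v`). -/
theorem cn2_seg_head (Lay : Layout) (hLay : Lay.hi = 0x1000000) (μ : Microarch) (hμ : UserX.MicroOK μ) (u₀ : State)
    (hcode : HasCodeNat Lay u₀ Gif.L.DGifGetCodeNext.entry Gif.Code.code_DGifGetCodeNext.nat Gif.L.DGifGetCodeNext.size)
    (H : Heap) (rest : List Obj) (frames : List (Nat × FrameLayout)) (F : Forest) (R : Rd) (e : State) (ret : Word)
    (h_InternalRead : ∀ n : Nat, Calls Lay μ ProgX.Base.WayInv (ProgX.Base.conv u₀) Gif.L.InternalRead.entry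
      (Gif.Spec.InternalRead.spec H rest (DGifGetCodeNext.framesIn frames e) F R n))
    (h_asan_store8_noabort : Asan.SmallCheck Lay μ ProgX.Base.WayInv (ProgX.Base.CodeOK u₀) [.rax, .rcx, .rdx] 8 ProgX.Base.L.__asan_store8_noabort.entry)
    (h_asan_store1_noabort : Asan.SmallCheck Lay μ ProgX.Base.WayInv (ProgX.Base.CodeOK u₀) [.rax, .rdx] 1 ProgX.Base.L.__asan_store1_noabort.entry)
    (v : State) (hat : DGifGetCodeNext.AfterLen H rest frames F R u₀ e ret v) :
    ReachVia Lay μ ProgX.Base.WayInv v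
      (fun w => DGifGetCodeNext.Done H rest frames F R u₀ e ret w ∨ cn2_AtRet9 H rest frames F R u₀ e ret w) := by
  obtain ⟨hbody, hrax, hr14, hrem_eq⟩ := hat
  have he := hbody.entry
  v_entry he
  obtain ⟨henv, hrdi, hout⟩ := hbody.pre
  have habove := hbody.block_above
  have hlow := hout.low
  have w_rip := hbody.rip
  have c_rsp : v.reg .rsp = e.reg .rsp - 136 := hbody.rsp
  have c_rbx : v.reg .rbx = e.reg .rdi := hbody.rbx
  have c_r13 : v.reg .r13 = e.reg .rsi := hbody.r13
  obtain ⟨z, c_rax⟩ : ∃ z, v.reg .rax = z := ⟨_, rfl⟩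
  obtain ⟨pv, c_r14⟩ : ∃ pv, v.reg .r14 = pv := ⟨_, rfl⟩
  rw [c_rax] at hrax
  rw [c_r14] at hr14
  -- the length byte `Buf` (the frame's object at `RA − 88`), as a number `n`
  obtain ⟨n, l_buf⟩ : ∃ n, v.mem.readLE (e.reg .rsp - 88) 1 = n := ⟨_, rfl⟩
  have hn256 : n < 256 := by
    rw [← l_buf]
    exact readLE1_lt _ _
  have hir := h_InternalRead n
  have w_kept : RegsKept [.rsp] v v := RegsKept.refl _ _
  have w_eq : Mem.EqOn ProgX.Base.L.textLo ProgX.Base.L.textHi u₀.mem v.mem := ProgX.Base.conv_code_eqOn hbody.code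
  have hdf := (show abiInv _ from hbody.abi).1
  have hmx := (show abiInv _ from hbody.abi).2
  have hsse := ProgX.Base.sseOK_of_abiInv hbody.abi
  have hcur := henv.ctx.cursor_range henv.heap.inv.shadow
  have hgin := henv.ok.owns.inside henv.heap.inv.heap (o := (F.gif, 120)) List.mem_cons_self
  have hpin := henv.ok.owns.inside henv.heap.inv.heap (o := (F.pv, 24936)) (List.mem_cons_of_mem _ List.mem_cons_self)
  have hbase := henv.heap.base
  simp only at hgin hpin
  rw [hbase] at hgin hpin
  have hg1 := hgin.1
  have hg2 := hgin.2.2.2.2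
  have hp1 := hpin.1
  have hp2 := hpin.2.2.2.2
  clear hgin hpin
  -- `*CodeBlock` and pv are live under the body's frames
  have hbl : LiveIn (H.liveObjs ++ rest) (DGifGetCodeNext.framesIn frames e) (e.reg .rsi).toNat 8 :=
    hout.buf.live.push_frame _
  have hpl : LiveIn (H.liveObjs ++ rest) (DGifGetCodeNext.framesIn frames e) F.pv 24936 :=
    hbody.ok.pv_live.liveIn rest _ (Nat.le_refl _) (Nat.le_refl _)
  have hb0 : LiveIn (H.liveObjs ++ rest) (DGifGetCodeNext.framesIn frames e) (F.pv + 88) 1 := by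
    have h := bufLive hbody.ok.pv_live rest (DGifGetCodeNext.framesIn frames e) 0 1 (by omega)
    simp only [gfield] at h
    exact h
  u_walk hcode [hμ.vendor] until [Gif.L.DGifGetCodeNext.at_109fc6, Gif.L.DGifGetCodeNext.ret9] span [ProgX.Base.L.textLo, ProgX.Base.L.textHi] side (v_side)
  case check_10a02e =>
    -- dgif_lib.c:792 the store of `*CodeBlock = &pv.Buf`
    have hun : ShadowUntouched v.mem s_10a02e.mem := by v_untouched
    exact hbl.accSmall hbody.inv.shadow hun _ 8 (by decide) (by u_omega) (by u_omega)
  case check_10a03f =>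
    -- dgif_lib.c:793 the store of `pv.Buf[0] = n`
    have hun : ShadowUntouched v.mem s_10a03f.mem := by v_untouched
    exact hb0.accSmall hbody.inv.shadow hun _ 1 (by decide) (by u_omega) (by u_omega)
  case check_109ff4 =>
    -- dgif_lib.c:801 the store of `*CodeBlock = NULL`
    have hun : ShadowUntouched v.mem s_109ff4.mem := by v_untouched
    exact hbl.accSmall hbody.inv.shadow hun _ 8 (by decide) (by u_omega) (by u_omega)
  case check_10a005 =>
    -- dgif_lib.c:802 the store of `pv.Buf[0] = 0`
    have hun : ShadowUntouched v.mem s_10a005.mem := by v_untouched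
    exact hb0.accSmall hbody.inv.shadow hun _ 1 (by decide) (by u_omega) (by u_omega)
  case check_10a013 =>
    -- dgif_lib.c:803 the store of `pv.PixelCount = 0`
    have hun : ShadowUntouched v.mem s_10a013.mem := by v_untouched
    exact hpl.accSmall hbody.inv.shadow hun _ 8 (by decide) (by u_omega) (by u_omega)
  case call_inv =>
    v_inv
  case pre_10a057 =>
    -- INTERNALREAD'S PRECONDITION: the stores since `v` went to the own stack, `*CodeBlock` and `pv.Buf[0]`
    have hun : ShadowUntouched v.mem s_10a057.mem := by v_untouched
    have hs : Mem.SameExcept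
      [⟨(e.reg .rsp).toNat - 320, (e.reg .rsp).toNat - 120⟩,
       ⟨(e.reg .rsi).toNat, (e.reg .rsi).toNat + 8⟩,
       ⟨F.pv + 88, F.pv + 89⟩] v.mem s_10a057.mem := by
      rw [w_mem]
      u_same
    have hq : ∀ w, w ∈
        [⟨(e.reg .rsp).toNat - 320, (e.reg .rsp).toNat - 120⟩,
         ⟨(e.reg .rsi).toNat, (e.reg .rsi).toNat + 8⟩,
         (⟨F.pv + 88, F.pv + 89⟩ : Span)] → cn2_Quiet F e w := by
      intro w hin
      simp only [List.mem_cons, List.not_mem_nil, or_false] at hin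
      rcases hin with rfl | rfl | rfl
      · left
        simp only
        omega
      · right
        left
        simp only
        omega
      · right
        right
        right
        left
        simp only
        omega
    obtain ⟨hinv1, hok1, hrem1⟩ := cn2_keep hbody hun hs hq
    have henv' : Env H rest (DGifGetCodeNext.framesIn frames e) F R s_10a057 := by
      refine henv.at_call hinv1 hok1 (Mem.SameExcept.refl [⟨(e.reg .rsp).toNat - 320, (e.reg .rsp).toNat - 136⟩] _)
        (by omega) (by omega) ?_ ?_ ?_
      · rw [w_rsp]
        u_omega
      · rw [w_rsp]
        u_omega
      · rw [w_rsp]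
        u_omega
    -- the branch fact of `test r15b, r15b ; jne`: `n ≠ 0`
    rw [cn2_byte_val n hn256] at hbr_109fef
    -- the buffer `pv.Buf[1 … n]`
    have e_rsi : (s_10a057.reg .rsi).toNat = F.pv + 89 := by
      rw [w_rsi]
      u_omega
    have hbuf : BufOK H rest (DGifGetCodeNext.framesIn frames e) F R (s_10a057.reg .rsi).toNat n := by
      rw [e_rsi]
      refine ⟨?_, ?_, ?_, by omega⟩
      · have h := bufLive hbody.ok.pv_live rest (DGifGetCodeNext.framesIn frames e) 1 n (by omega)
        simp only [gfield] at h
        exact h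
      · apply Loose.pvBody
        right
        simp only
        omega
      · apply HeapWin.pv hbody.inv.heap hbody.ok.owns
        · simp only
          omega
        · simp only
          omega
    refine ⟨henv', ?_, ?_, by omega, by omega, hbuf⟩
    · rw [w_rdi]
      exact hrdi
    · rw [w_rdx, cn2_byte_reg n hn256]
      omega
  · -- 0x10a05c (ret9): INTERNALREAD HAS RETURNED. Its post: `k` bytes delivered
    obtain ⟨k, hk1, hk2, hk3, hk4, hk5, hback⟩ :
      ReadPost H rest (DGifGetCodeNext.framesIn frames e) F R n s_10a057 s_10a057r := w_post
    rw [cn2_byte_val n hn256] at w_mem_10a057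
    -- the stores before the call: the own stack, `*CodeBlock`, `pv.Buf[0]`
    have hun0 : ShadowUntouched v.mem s_10a057.mem := by
      unfold Asan.ShadowUntouched
      rw [w_mem_10a057]
      u_eqon
    have hs0 : Mem.SameExcept
      [⟨(e.reg .rsp).toNat - 320, (e.reg .rsp).toNat - 120⟩,
       ⟨(e.reg .rsi).toNat, (e.reg .rsi).toNat + 8⟩,
       ⟨F.pv + 88, F.pv + 89⟩] v.mem s_10a057.mem := by
      rw [w_mem_10a057]
      u_same
    have hq : ∀ w, w ∈
        [⟨(e.reg .rsp).toNat - 320, (e.reg .rsp).toNat - 120⟩,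
         ⟨(e.reg .rsi).toNat, (e.reg .rsi).toNat + 8⟩,
         (⟨F.pv + 88, F.pv + 89⟩ : Span)] → cn2_Quiet F e w := by
      intro w hin
      simp only [List.mem_cons, List.not_mem_nil, or_false] at hin
      rcases hin with rfl | rfl | rfl
      · left
        simp only
        omega
      · right
        left
        simp only
        omega
      · right
        right
        right
        left
        simp only
        omega
    obtain ⟨hinv0, hok0, hrem0⟩ := cn2_keep hbody hun0 hs0 hq
    -- `*CodeBlock` at the call: `&pv.Buf`
    have hcb0 : s_10a057.mem.readLE (e.reg .rsi) 8 = (pv + 88).toNat := by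
      rw [w_mem_10a057]
      u_read
    -- `*CodeBlock` misses the cursor (it is loose)
    have hoffc := hout.buf.loose.off_cursor henv.heap.inv.heap (henv.ok.owns.placed henv.heap.inv.heap) ⟨hcur.1, hcur.2.1⟩
    simp only at hoffc
    have e_top : (s_10a057.reg .rsp).toNat + 8 = (e.reg .rsp).toNat - 136 := by
      rw [w_rsp_10a057]
      u_omega
    -- the callee's footprint in terms of `v`
    v_after_call w_rsp_10a057 w_mem_10a057
    simp only [w_rsi_10a057] at w_same
    rw [w_mem_10a057] at hcb0
    have hcb1 : s_10a057r.mem.readLE (e.reg .rsi) 8 = (pv + 88).toNat := by u_frame hcb0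
    have hs1 : Mem.SameExcept
      [⟨(e.reg .rsp).toNat - 320, (e.reg .rsp).toNat - 120⟩,
       ⟨(e.reg .rsi).toNat, (e.reg .rsi).toNat + 8⟩,
       ⟨F.pv + 88, F.pv + 344⟩,
       ⟨R.cur, R.cur + 8⟩] v.mem s_10a057r.mem := by u_same
    have ha : ∀ w, w ∈
        [⟨(e.reg .rsp).toNat - 320, (e.reg .rsp).toNat - 120⟩,
         ⟨(e.reg .rsi).toNat, (e.reg .rsi).toNat + 8⟩,
         ⟨F.pv + 88, F.pv + 344⟩,
         (⟨R.cur, R.cur + 8⟩ : Span)] → cn2_Allowed F R e w := by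
      intro w hin
      simp only [List.mem_cons, List.not_mem_nil, or_false] at hin
      rcases hin with rfl | rfl | rfl | rfl
      · left
        left
        simp only
        omega
      · left
        right
        left
        simp only
        omega
      · left
        right
        right
        right
        left
        simp only
        omega
      · right
        simp only
        omega
    have hinv1 : HeapInv H rest (DGifGetCodeNext.framesIn frames e) ((e.reg .rsp).toNat - 136) s_10a057r.mem := by
      rw [← e_top]
      exact hback.inv
    have hrem1 : rem R s_10a057r.mem ≤ rem R v.mem := by
      rw [← hrem0]
      exact hback.rem
    have hbody1 : DGifGetCodeNext.Body Gif.L.DGifGetCodeNext.ret9 H rest frames F R u₀ e ret s_10a057r :=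
      cn2_body_carry hbody w_rip w_rsp (w_kept.get .rbx rfl) (w_kept.get .r13 rfl) (w_kept.get .rbp rfl) w_code w_inv hs1 ha
        hinv1 hback.ok hrem1
    refine ReachVia.done (Or.inr ?_)
    exact {
      body := hbody1
      r12 := by
        rw [w_r12, toNat_ofBV32, toNat_part32, hrax]
      block := by
        rw [← rd_eq_readLE s_10a057r.mem (e.reg .rsi) _ 8 rfl, hcb1]
        u_omega
      adv := by
        omega
    }
  · -- 0x109fc6 FROM 0x10a020: the terminator: `*CodeBlock = NULL`, `pv.Buf[0] = 0`, `pv.PixelCount = 0`; the result is 1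
    have hun : ShadowUntouched v.mem s_10a020.mem := by v_untouched
    have hs : Mem.SameExcept
      [⟨(e.reg .rsp).toNat - 320, (e.reg .rsp).toNat - 120⟩,
       ⟨(e.reg .rsi).toNat, (e.reg .rsi).toNat + 8⟩,
       ⟨F.pv + 88, F.pv + 89⟩,
       ⟨F.pv + 56, F.pv + 64⟩] v.mem s_10a020.mem := by
      rw [w_mem]
      u_same
    have hq : ∀ w, w ∈
        [⟨(e.reg .rsp).toNat - 320, (e.reg .rsp).toNat - 120⟩,
         ⟨(e.reg .rsi).toNat, (e.reg .rsi).toNat + 8⟩,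
         ⟨F.pv + 88, F.pv + 89⟩,
         (⟨F.pv + 56, F.pv + 64⟩ : Span)] → cn2_Quiet F e w := by
      intro w hin
      simp only [List.mem_cons, List.not_mem_nil, or_false] at hin
      rcases hin with rfl | rfl | rfl | rfl
      · left
        simp only
        omega
      · right
        left
        simp only
        omega
      · right
        right
        right
        left
        simp only
        omega
      · right
        right
        left
        simp only
        omega
    have habi : (conv u₀).inv s_10a020 := by
      refine ProgX.Base.abiInv_of ?_ ?_
      · rw [w_flags]
        exact w_df_10a013
      · rw [w_mxcsr]
        exact hmx
    obtain ⟨hbody1, hrem1⟩ := cn2_body_quiet (cut' := Gif.L.DGifGetCodeNext.at_109fc6) hbody w_rip w_rsp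
      (w_kept.get .rbx rfl) (w_kept.get .r13 rfl) (w_kept.get .rbp rfl) (ProgX.Base.conv_code_in w_eq) habi hun hs hq
    have hcb : s_10a020.mem.readLE (e.reg .rsi) 8 = 0 := by
      rw [w_mem]
      u_read
    refine ReachVia.done (Or.inl ?_)
    exact {
      body := hbody1
      res := by
        left
        rw [w_r12, toNat_ofBV32, toNat_part32, hrax]
      ok1 := by
        intro _
        refine ⟨Or.inl ?_, ?_⟩
        · rw [← rd_eq_readLE s_10a020.mem (e.reg .rsi) _ 8 rfl]
          exact hcb
        · rw [hrem1]
          omega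
    }

/-- **10A05CH (ret9) … 109FC6H** (dgif_lib.c:796-798): `cmp edx, eax` (the count against `Buf`, re-read from the frame); equal: the
result stays 1; else the checked store of `gif.Error = D_GIF_ERR_READ_FAILED`, `r12d = 0`. -/
theorem cn2_seg_tail (Lay : Layout) (hLay : Lay.hi = 0x1000000) (μ : Microarch) (hμ : UserX.MicroOK μ) (u₀ : State)
    (hcode : HasCodeNat Lay u₀ Gif.L.DGifGetCodeNext.entry Gif.Code.code_DGifGetCodeNext.nat Gif.L.DGifGetCodeNext.size)
    (H : Heap) (rest : List Obj) (frames : List (Nat × FrameLayout)) (F : Forest) (R : Rd) (e : State) (ret : Word)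
    (h_asan_store4_noabort : Asan.SmallCheck Lay μ ProgX.Base.WayInv (ProgX.Base.CodeOK u₀) [.rax, .rcx, .rdx] 4
      ProgX.Base.L.__asan_store4_noabort.entry)
    (v : State) (hat : cn2_AtRet9 H rest frames F R u₀ e ret v) :
    ReachVia Lay μ ProgX.Base.WayInv v (DGifGetCodeNext.Done H rest frames F R u₀ e ret) := by
  -- THE PRELUDE
  obtain ⟨hbody, hr12, hblock, hadv⟩ := hat
  have he := hbody.entry
  v_entry he
  obtain ⟨henv, hrdi, hout⟩ := hbody.pre
  have habove := hbody.block_above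
  have hlow := hout.low
  have w_rip := hbody.rip
  have c_rsp : v.reg .rsp = e.reg .rsp - 136 := hbody.rsp
  have c_rbx : v.reg .rbx = e.reg .rdi := hbody.rbx
  obtain ⟨z, c_rax⟩ : ∃ z, v.reg .rax = z := ⟨_, rfl⟩
  have w_kept : RegsKept [.rsp] v v := RegsKept.refl _ _
  have w_eq : Mem.EqOn ProgX.Base.L.textLo ProgX.Base.L.textHi u₀.mem v.mem := ProgX.Base.conv_code_eqOn hbody.code
  have hdf := (show abiInv _ from hbody.abi).1
  have hmx := (show abiInv _ from hbody.abi).2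
  have hsse := ProgX.Base.sseOK_of_abiInv hbody.abi
  have hcur := henv.ctx.cursor_range henv.heap.inv.shadow
  have hgin := henv.ok.owns.inside henv.heap.inv.heap (o := (F.gif, 120)) List.mem_cons_self
  have hbase := henv.heap.base
  simp only at hgin
  rw [hbase] at hgin
  have hg1 := hgin.1
  have hg2 := hgin.2.2.2.2
  clear hgin
  -- gif is live under the body's frames
  have hgl : LiveIn (H.liveObjs ++ rest) (DGifGetCodeNext.framesIn frames e) F.gif 120 :=
    hbody.ok.gif_live.liveIn rest _ (Nat.le_refl _) (Nat.le_refl _)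
  u_walk hcode [hμ.vendor] until [Gif.L.DGifGetCodeNext.at_109fc6] span [ProgX.Base.L.textLo, ProgX.Base.L.textHi] side (v_side)
  case check_10a06f =>
    -- dgif_lib.c:797 the store of `gif.Error`
    have hun : ShadowUntouched v.mem s_10a06f.mem := by v_untouched
    exact hgl.accSmall hbody.inv.shadow hun _ 4 (by decide) (by u_omega) (by u_omega)
  · -- 0x109fc6 FROM 0x10a065: the count is `Buf`: nothing stored, the result stays 1
    have hun : ShadowUntouched v.mem s_10a065.mem := by
      rw [w_mem]
      exact Mem.EqOn.refl _ _ _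
    have hs : Mem.SameExcept [] v.mem s_10a065.mem := by
      rw [w_mem]
      exact Mem.SameExcept.refl _ _
    have hq : ∀ w, w ∈ ([] : List Span) → cn2_Quiet F e w := by
      intro w hin
      exact absurd hin List.not_mem_nil
    have habi : (conv u₀).inv s_10a065 := by
      refine ProgX.Base.abiInv_of ?_ ?_
      · rw [w_flags]
        simp only [X86.User.df_setStatus]
        exact hdf
      · rw [w_mxcsr]
        exact hmx
    obtain ⟨hbody1, hrem1⟩ := cn2_body_quiet (cut' := Gif.L.DGifGetCodeNext.at_109fc6) hbody w_rip w_rsp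
      (w_kept.get .rbx rfl) (w_kept.get .r13 rfl) (w_kept.get .rbp rfl) (ProgX.Base.conv_code_in w_eq) habi hun hs hq
    refine ReachVia.done ?_
    exact {
      body := hbody1
      res := by
        left
        rw [w_kept.get .r12 rfl]
        exact hr12
      ok1 := by
        intro _
        refine ⟨Or.inr ?_, ?_⟩
        · rw [w_mem]
          exact hblock
        · rw [hrem1]
          exact hadv
    }
  · -- 0x109fc6 FROM 0x10a081: a short read: `gif.Error = D_GIF_ERR_READ_FAILED` stored, the result is 0
    have hun : ShadowUntouched v.mem s_10a081.mem := by v_untouched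
    have hs : Mem.SameExcept
      [⟨(e.reg .rsp).toNat - 320, (e.reg .rsp).toNat - 120⟩,
       ⟨F.gif + 96, F.gif + 100⟩] v.mem s_10a081.mem := by
      rw [w_mem]
      u_same
    have hq : ∀ w, w ∈
        [⟨(e.reg .rsp).toNat - 320, (e.reg .rsp).toNat - 120⟩,
         (⟨F.gif + 96, F.gif + 100⟩ : Span)] → cn2_Quiet F e w := by
      intro w hin
      simp only [List.mem_cons, List.not_mem_nil, or_false] at hin
      rcases hin with rfl | rfl
      · left
        simp only
        omega
      · right
        right
        right
        right
        simp only
        omega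
    have habi : (conv u₀).inv s_10a081 := by
      refine ProgX.Base.abiInv_of ?_ ?_
      · rw [w_flags]
        exact w_df_10a06f
      · rw [w_mxcsr]
        exact hmx
    obtain ⟨hbody1, hrem1⟩ := cn2_body_quiet (cut' := Gif.L.DGifGetCodeNext.at_109fc6) hbody w_rip w_rsp
      (w_kept.get .rbx rfl) (w_kept.get .r13 rfl) (w_kept.get .rbp rfl) (ProgX.Base.conv_code_in w_eq) habi hun hs hq
    have h0 : (s_10a081.reg .r12).toNat = 0 := by
      rw [w_r12]
      decide
    refine ReachVia.done ?_
    exact {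
      body := hbody1
      res := Or.inr h0
      ok1 := by
        intro h1
        rw [h0] at h1
        exact absurd h1 (by decide)
    }

end Gif.Spec.DGifGetCodeNext_2
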